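-- pv_equiv track=rewrite | github.com/jied314/IQs | tags/hash_table/valid_sudoku.py | is_valid_square
-- ===== SOURCE A (Python) =====
-- def is_valid_square(board, i, j):
--     ii = (i, i+1, i+2)
--     jj = (j, j+1, j+2)
--     uniques = set()
--     for k in ii:
--         for l in jj:
--             if board[k][l] == ".":
--                 continue
--             e = board[k][l]
--             if e in uniques:
--                 return False
--             uniques.add(e)
--     return True
-- ===== SOURCE B (Python) =====
-- def is_valid_square(board, i, j):
--     vals = sorted(board[k][l] for k in (i, i + 1, i + 2)
--                   for l in (j, j + 1, j + 2)
--                   if board[k][l] != ".")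
--     return all(a != b for a, b in zip(vals, vals[1:]))
-- ===== Notes on version B (the rewrite author's own statement) =====
-- stated objective: alternative
-- what changed: B sorts the non-'.' cell values and scans adjacent pairs for an equal neighbour (sort-then-scan duplicate detection), instead of A's single pass with a growing membership set and an early return.
-- outside the precondition, e.g. on is_valid_square([['1', '1']], 0, 0): A returns False, B raises IndexError
import Mathlib
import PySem

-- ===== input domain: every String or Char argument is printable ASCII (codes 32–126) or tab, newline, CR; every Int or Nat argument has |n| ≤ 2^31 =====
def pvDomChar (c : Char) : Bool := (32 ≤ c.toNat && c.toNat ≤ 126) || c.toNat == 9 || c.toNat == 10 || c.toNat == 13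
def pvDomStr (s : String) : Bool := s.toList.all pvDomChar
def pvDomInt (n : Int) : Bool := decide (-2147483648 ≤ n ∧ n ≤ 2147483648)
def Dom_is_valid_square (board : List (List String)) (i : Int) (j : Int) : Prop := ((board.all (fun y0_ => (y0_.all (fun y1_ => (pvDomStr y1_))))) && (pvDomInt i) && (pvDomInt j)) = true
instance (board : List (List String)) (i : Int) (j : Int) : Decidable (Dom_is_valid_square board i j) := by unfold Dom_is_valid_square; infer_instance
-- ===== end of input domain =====

-- B sorts the non-'.' cell values and scans adjacent pairs for an equal neighbour,
-- instead of A's single pass with a growing membership set and an early return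
-- (objective: alternative).


-- the nine cell values board[k][l], k in (i,i+1,i+2), l in (j,j+1,j+2), in that order
-- (the .getD defaults only fire outside Pre_, where nothing is claimed)
def pvCells (board : List (List String)) (i : Int) (j : Int) : List String :=
  [i, i+1, i+2].flatMap (fun k =>
    [j, j+1, j+2].map (fun l =>
      (PySem.List.pyGet? ((PySem.List.pyGet? board k).getD []) l).getD ""))

-- ===== PORT A =====
-- the nested loop with the running 'uniques' set and the early 'return False'
def pvGoA : List String → PySem.Set String → Bool
  | [], _ => true
  | e :: rest, uniques =>
    if e = "." then pvGoA rest uniques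
    else if PySem.Set.contains uniques e then false
    else pvGoA rest (PySem.Set.add uniques e)

def is_valid_square (board : List (List String)) (i : Int) (j : Int) : Bool :=
  pvGoA (pvCells board i j) PySem.Set.empty

-- ===== PORT B =====
-- all(a != b for a, b in zip(vals, vals[1:])): adjacent pairs all distinct
def pvAdjOk : List String → Bool
  | a :: b :: rest => a ≠ b && pvAdjOk (b :: rest)
  | _ => true

def is_valid_square_alt (board : List (List String)) (i : Int) (j : Int) : Bool :=
  let vals := PySem.List.sorted ((pvCells board i j).filter (fun e => e ≠ ".")) (fun x => x) false
  pvAdjOk vals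

-- ===== PRECONDITION & SPEC =====
-- Pre_ requires all nine cell accesses board[k][l] to be in range (Python's negative
-- wraparound counts as in range). It excludes inputs where some later cell is out of
-- range: there A can still return False through its early duplicate return, while B,
-- which reads all nine cells before sorting, raises IndexError.
def Pre_is_valid_square (board : List (List String)) (i : Int) (j : Int) : Prop :=
  ([i, i+1, i+2].all (fun k =>
    match PySem.List.pyGet? board k with
    | some row => [j, j+1, j+2].all (fun l => (PySem.List.pyGet? row l).isSome)
    | none => false)) = true
instance (board : List (List String)) (i : Int) (j : Int) : Decidable (Pre_is_valid_square board i j) := by unfold Pre_is_valid_square; infer_instance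

def pvWitness_is_valid_square : List (List String) × Int × Int :=
  ([["1","2","3"],["4","5","6"],["7","8","."]], 0, 0)

def Spec_is_valid_square (board : List (List String)) (i : Int) (j : Int) (out : Bool) : Prop := out = is_valid_square_alt board i j
instance (board : List (List String)) (i : Int) (j : Int) (out : Bool) : Decidable (Spec_is_valid_square board i j out) := by unfold Spec_is_valid_square; infer_instance

-- ===== CLAIM =====
def Claim_equal_is_valid_square : Prop := ∀ (board : List (List String)) (i : Int) (j : Int), Dom_is_valid_square board i j → Pre_is_valid_square board i j → Spec_is_valid_square board i j (is_valid_square board i j)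

-- ===== LEMMAS AND PROOFS =====

-- A's scan succeeds iff the non-'.' values are pairwise distinct and disjoint from the accumulator
lemma pvGoA_true_iff (cells : List String) (u : PySem.Set String) :
    pvGoA cells u = true ↔
      ((cells.filter (fun e => e ≠ ".")).Nodup ∧
        ∀ e ∈ cells.filter (fun e => e ≠ "."), e ∉ u) := by
  induction cells generalizing u with
  | nil => simp [pvGoA]
  | cons e rest ih =>
    by_cases hdot : e = "."
    · simp [pvGoA, hdot, ih, List.mem_filter, decide_not]
    · have hfc : (e :: rest).filter (fun e => e ≠ ".") =
          e :: rest.filter (fun e => e ≠ ".") := by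
        simp [hdot]
      by_cases hmem : e ∈ u
      · have hc : PySem.Set.contains u e = true := (PySem.Set.contains_iff u e).mpr hmem
        simp only [pvGoA, if_neg hdot, hc, if_true, hfc]
        constructor
        · intro h; exact absurd h (by simp)
        · rintro ⟨-, hall⟩
          exact absurd hmem (hall e (List.mem_cons_self ..))
      · have hc : ¬ PySem.Set.contains u e = true := fun h =>
          hmem ((PySem.Set.contains_iff u e).mp h)
        simp only [pvGoA, if_neg hdot, hc, if_false, Bool.false_eq_true, ih, hfc,
          List.nodup_cons, List.mem_cons]
        constructor
        · rintro ⟨hn, hall⟩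
          refine ⟨⟨fun hef => ?_, hn⟩, ?_⟩
          · exact absurd ((PySem.Set.mem_add u e e).mpr (Or.inr rfl)) (hall e hef)
          · rintro x (rfl | hx)
            · exact hmem
            · intro hxu
              exact (hall x hx) ((PySem.Set.mem_add u e x).mpr (Or.inl hxu))
        · rintro ⟨⟨hef, hn⟩, hall⟩
          refine ⟨hn, fun x hx hxadd => ?_⟩
          rcases (PySem.Set.mem_add u e x).mp hxadd with hxu | rfl
          · exact hall x (Or.inr hx) hxu
          · exact hef hx

-- on a ≤-sorted list, 'no two neighbours equal' is exactly 'no duplicates'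
lemma pvAdjOk_iff_nodup (l : List String) (h : l.Pairwise (· ≤ ·)) :
    pvAdjOk l = true ↔ l.Nodup := by
  induction l with
  | nil => simp [pvAdjOk]
  | cons a t ih =>
    cases t with
    | nil => simp [pvAdjOk]
    | cons b rest =>
      rcases List.pairwise_cons.mp h with ⟨h1, h2⟩
      rcases List.pairwise_cons.mp h2 with ⟨h3, -⟩
      simp only [pvAdjOk, Bool.and_eq_true, ih h2, List.nodup_cons, List.mem_cons,
        decide_not, Bool.not_eq_eq_eq_not, Bool.not_true, decide_eq_false_iff_not]
      constructor
      · rintro ⟨hab, hnt, hrest⟩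
        refine ⟨?_, hnt, hrest⟩
        rintro (rfl | ha)
        · exact hab rfl
        · have hba : b ≤ a := h3 a ha
          have hab' : a ≤ b := h1 b (List.mem_cons_self ..)
          exact hab (le_antisymm hab' hba)
      · rintro ⟨hnm, hnt, hrest⟩
        exact ⟨fun hab => hnm (Or.inl hab), hnt, hrest⟩

-- ===== VERDICT =====
theorem is_valid_square_spec : Claim_equal_is_valid_square := by
  intro board i j _ _
  unfold Spec_is_valid_square is_valid_square is_valid_square_alt
  have hpw := PySem.List.sorted_pairwise
    ((pvCells board i j).filter (fun e => e ≠ ".")) (fun x => x)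
  have hperm := PySem.List.sorted_perm
    ((pvCells board i j).filter (fun e => e ≠ ".")) (fun x => x) false
  rw [Bool.eq_iff_iff, pvGoA_true_iff, pvAdjOk_iff_nodup _ hpw, hperm.nodup_iff]
  simp [PySem.Set.empty]
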